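-- pv_equiv track=rewrite | github.com/janjagusch/advent-of-code | aoc_2020/day_14/solution.py | convert_mask
-- ===== SOURCE A (Python) =====
-- def convert_mask(mask):
--     def and_mask(mask):
--         return int("".join(str(int(char != "0")) for char in mask), 2)
--
--     def or_mask(mask):
--         return int("".join(str(int(char == "1")) for char in mask), 2)
--
--     def floating_mask(mask):
--         return int("".join(str(int(char == "X")) for char in mask), 2)
--
--     return and_mask(mask), or_mask(mask), floating_mask(mask)
-- ===== SOURCE B (Python) =====
-- def convert_mask(mask):
--     a = o = f = 0
--     for char in mask:
--         a = (a << 1) | (char != "0")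
--         o = (o << 1) | (char == "1")
--         f = (f << 1) | (char == "X")
--     return (a, o, f)
-- ===== Notes on version B (the rewrite author's own statement) =====
-- stated objective: alternative
-- what changed: Replaces the three string-building comprehensions each followed by int(...,2) parsing with a single loop over mask maintaining three integer bit-accumulators (one arithmetic pass, no intermediate strings; on huge masks Python's C-level int(...,2) still wins, so no speed is claimed).
import Mathlib
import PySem

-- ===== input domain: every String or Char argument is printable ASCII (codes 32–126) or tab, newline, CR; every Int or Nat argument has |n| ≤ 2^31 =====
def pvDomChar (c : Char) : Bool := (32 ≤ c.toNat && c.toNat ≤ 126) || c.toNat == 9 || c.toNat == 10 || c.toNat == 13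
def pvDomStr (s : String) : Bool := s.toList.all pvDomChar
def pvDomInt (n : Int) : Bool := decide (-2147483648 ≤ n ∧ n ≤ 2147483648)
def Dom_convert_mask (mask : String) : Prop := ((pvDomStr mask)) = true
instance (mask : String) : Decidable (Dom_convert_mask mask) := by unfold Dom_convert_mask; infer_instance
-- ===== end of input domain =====

-- B replaces A's three string-building-plus-int(...,2) passes with ONE loop over the mask
-- keeping three integer bit accumulators (one pass, no intermediate strings; no speed claimed).

-- ===== PORT A =====
-- hand port of int(s, 2) for a string of '0'/'1' chars (exact there; A only feeds such
-- strings; the empty string, where Python raises ValueError, is outside Pre_)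
def pvParseBin (s : List Char) : Int :=
  s.foldl (fun acc c => 2 * acc + (if c = '1' then 1 else 0)) 0

def convert_mask (mask : String) : Int × Int × Int :=
  (pvParseBin (mask.toList.map (fun c => if !(c = '0') then '1' else '0')),
   pvParseBin (mask.toList.map (fun c => if c = '1' then '1' else '0')),
   pvParseBin (mask.toList.map (fun c => if c = 'X' then '1' else '0')))

-- ===== PORT B =====
-- `(a <<< 1) ||| bit` on a nonnegative accumulator with bit ∈ {0,1} is `2*a + bit`, ported as such
def convert_mask_alt (mask : String) : Int × Int × Int :=
  mask.toList.foldl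
    (fun (s : Int × Int × Int) c =>
      (2 * s.1 + (if !(c = '0') then 1 else 0),
       2 * s.2.1 + (if c = '1' then 1 else 0),
       2 * s.2.2 + (if c = 'X' then 1 else 0)))
    (0, 0, 0)

-- ===== PRECONDITION & SPEC =====
-- Pre_ excludes only the empty mask, on which A raises ValueError via int('', 2).
def Pre_convert_mask (mask : String) : Prop := mask ≠ ""
instance (mask : String) : Decidable (Pre_convert_mask mask) := by unfold Pre_convert_mask; infer_instance
def pvWitness_convert_mask : String := "X10"

def Spec_convert_mask (mask : String) (out : Int × Int × Int) : Prop := out = convert_mask_alt mask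
instance (mask : String) (out : Int × Int × Int) : Decidable (Spec_convert_mask mask out) := by unfold Spec_convert_mask; infer_instance

-- ===== CLAIM (what is proved, stated in full; the proofs are below) =====
def Claim_equal_convert_mask : Prop := ∀ (mask : String), Dom_convert_mask mask → Pre_convert_mask mask → Spec_convert_mask mask (convert_mask mask)

-- ===== LEMMAS AND PROOFS =====
theorem fold_split (l : List Char) (a o f : Int) :
    l.foldl
      (fun (s : Int × Int × Int) c =>
        (2 * s.1 + (if !(c = '0') then 1 else 0),
         2 * s.2.1 + (if c = '1' then 1 else 0),
         2 * s.2.2 + (if c = 'X' then 1 else 0)))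
      (a, o, f)
    = ((l.map (fun c => if !(c = '0') then '1' else '0')).foldl
         (fun acc c => 2 * acc + (if c = '1' then 1 else 0)) a,
       (l.map (fun c => if c = '1' then '1' else '0')).foldl
         (fun acc c => 2 * acc + (if c = '1' then 1 else 0)) o,
       (l.map (fun c => if c = 'X' then '1' else '0')).foldl
         (fun acc c => 2 * acc + (if c = '1' then 1 else 0)) f) := by
  induction l generalizing a o f with
  | nil => rfl
  | cons c t ih =>
      simp only [List.foldl_cons, List.map_cons, ih]
      by_cases h0 : c = '0' <;> by_cases h1 : c = '1' <;> by_cases hX : c = 'X' <;>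
        simp_all

-- ===== VERDICT (by name: the statement is the Claim_ definition above) =====
theorem convert_mask_spec : Claim_equal_convert_mask := by
  intro mask _ _
  unfold Spec_convert_mask convert_mask convert_mask_alt pvParseBin
  rw [fold_split]
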